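-- pv_equiv track=rewrite | github.com/jbkarvens/baekjoon | 백준/Diamond/16998. It’s a Mod， Mod， Mod， Mod World/It’s a Mod， Mod， Mod， Mod World.py | solve
-- ===== SOURCE A (Python) =====
-- def solve(p,q,n):
--     if p==0:
--         return 0
--     if q==1:
--         return n*(n+1)//2*p
--     if n==0:
--         return 0
--     if p>q:
--         return n*(n+1)//2*(p//q)+solve(p%q,q,n)
--     return n*((n*p)//q)+n//q-solve(q,p,(n*p)//q)
-- ===== SOURCE B (Python) =====
-- def solve(p, q, n):
--     # Iterative Euclidean loop: divmod reduction + swap fused into one loop body,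
--     # with an accumulator and a flipping sign instead of A's subtracted recursion.
--     ans = 0
--     sign = 1
--     while p != 0 and n != 0 and q != 1:
--         d, p = divmod(p, q)
--         ans += sign * (n * (n + 1) // 2) * d
--         if p == 0:
--             break
--         m = n * p // q
--         ans += sign * (n * m + n // q)
--         p, q, n, sign = q, p, m, -sign
--     if q == 1 and p != 0:
--         ans += sign * (n * (n + 1) // 2) * p
--     return ans
-- ===== Notes on version B (the rewrite author's own statement) =====
-- stated objective: alternative
-- what changed: Replaced the sign-alternating recursion by a single fused iterative loop: each iteration does an unconditional divmod reduction plus the swap step, carrying an accumulator and a flipping sign; the q==1 closing term is emitted after the loop.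
-- outside the precondition, e.g. on solve(-3, 7, -1): A returns -1, B returns 0; on solve(-3, 6, 2): A returns -2, B returns -3
import Mathlib
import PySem

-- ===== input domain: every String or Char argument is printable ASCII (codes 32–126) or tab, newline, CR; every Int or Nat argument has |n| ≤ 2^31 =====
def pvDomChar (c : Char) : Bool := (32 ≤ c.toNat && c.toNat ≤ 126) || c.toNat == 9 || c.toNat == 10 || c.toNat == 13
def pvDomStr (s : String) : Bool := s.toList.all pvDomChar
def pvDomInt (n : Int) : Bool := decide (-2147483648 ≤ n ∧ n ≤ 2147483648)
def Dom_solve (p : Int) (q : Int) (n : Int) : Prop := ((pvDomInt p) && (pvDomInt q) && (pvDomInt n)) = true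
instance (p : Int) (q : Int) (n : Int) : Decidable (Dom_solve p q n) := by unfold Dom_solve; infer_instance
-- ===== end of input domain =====

-- B fuses A's sign-alternating recursion into one iterative loop (unconditional divmod
-- reduction + swap per iteration, accumulator and flipping sign, closing q=1 term after
-- the loop); objective: alternative decomposition, same cost.

-- ===== PORT A =====
-- fuel makes the (possibly non-terminating) Python recursion total; on Pre_ the fuel is never exhausted
def solveFuel : Nat → Int → Int → Int → Int
  | 0, _, _, _ => 0
  | f+1, p, q, n =>
    if p = 0 then 0
    else if q = 1 then PySem.Int.floordiv (n * (n + 1)) 2 * p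
    else if n = 0 then 0
    else if q < p then
      PySem.Int.floordiv (n * (n + 1)) 2 * PySem.Int.floordiv p q
        + solveFuel f (PySem.Int.mod p q) q n
    else
      n * PySem.Int.floordiv (n * p) q + PySem.Int.floordiv n q
        - solveFuel f q p (PySem.Int.floordiv (n * p) q)

def solve (p : Int) (q : Int) (n : Int) : Int := solveFuel 8589934592 p q n

-- ===== PORT B =====
-- the while-loop of Source B over the state (ans, sign, p, q, n); same fuel guard for totality
def solveLoop : Nat → Int × Int × Int × Int × Int → Int × Int × Int × Int × Int
  | 0, st => st
  | f+1, (ans, sign, p, q, n) =>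
    if p ≠ 0 ∧ n ≠ 0 ∧ q ≠ 1 then
      let d := PySem.Int.floordiv p q
      let r := PySem.Int.mod p q
      let ans1 := ans + sign * PySem.Int.floordiv (n * (n + 1)) 2 * d
      if r = 0 then (ans1, sign, r, q, n)
      else
        let m := PySem.Int.floordiv (n * r) q
        solveLoop f (ans1 + sign * (n * m + PySem.Int.floordiv n q), -sign, q, r, m)
    else (ans, sign, p, q, n)

-- the code after the while loop of Source B
def solvePost : Int × Int × Int × Int × Int → Int
  | (ans, sign, p, q, n) =>
    if q = 1 ∧ p ≠ 0 then ans + sign * PySem.Int.floordiv (n * (n + 1)) 2 * p else ans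

def solve_alt (p : Int) (q : Int) (n : Int) : Int :=
  solvePost (solveLoop 8589934592 (0, 1, p, q, n))

-- ===== PRECONDITION & SPEC =====
-- Pre_ excludes (a) inputs where the Python recursion raises (ZeroDivisionError at q=0,
-- RecursionError e.g. at p=q>1) and (b) the rare mixed-sign inputs with p<0 or q<0 that are
-- outside this problem's positive-parameter domain, where A mostly diverges and an occasional
-- return is an accident of one reduction step (see cites).
def Pre_solve (p : Int) (q : Int) (n : Int) : Prop :=
  p = 0 ∨ n = 0 ∨ q = 1 ∨ (0 < p ∧ 0 < q ∧ p ≠ q)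
instance (p : Int) (q : Int) (n : Int) : Decidable (Pre_solve p q n) := by
  unfold Pre_solve; infer_instance

def pvWitness_solve : Int × Int × Int := (3, 7, 10)

def Spec_solve (p : Int) (q : Int) (n : Int) (out : Int) : Prop := out = solve_alt p q n
instance (p : Int) (q : Int) (n : Int) (out : Int) : Decidable (Spec_solve p q n out) := by
  unfold Spec_solve; infer_instance

-- ===== CLAIM (what is proved, stated in full; the proofs are below) =====
def Claim_equal_solve : Prop :=
  ∀ (p : Int) (q : Int) (n : Int), Dom_solve p q n → Pre_solve p q n →
    Spec_solve p q n (solve p q n)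

-- ===== LEMMAS AND PROOFS =====

-- "good" states: the inputs the proof tracks through the recursion (= Pre_solve)
def Good (p q n : Int) : Prop := p = 0 ∨ n = 0 ∨ q = 1 ∨ (0 < p ∧ 0 < q ∧ p ≠ q)

-- termination measure: strictly decreases along both reduction and swap steps
def mu (p q : Int) : Nat := 2 * q.toNat + p.toNat + 1

theorem solveFuel_succ (f : Nat) (p q n : Int) :
    solveFuel (f+1) p q n =
      if p = 0 then 0
      else if q = 1 then PySem.Int.floordiv (n * (n + 1)) 2 * p
      else if n = 0 then 0
      else if q < p then
        PySem.Int.floordiv (n * (n + 1)) 2 * PySem.Int.floordiv p q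
          + solveFuel f (PySem.Int.mod p q) q n
      else
        n * PySem.Int.floordiv (n * p) q + PySem.Int.floordiv n q
          - solveFuel f q p (PySem.Int.floordiv (n * p) q) := rfl

-- facts about one step at a non-base good state
theorem step_facts (p q n : Int) (hg : Good p q n) (hp0 : p ≠ 0) (hq1 : q ≠ 1) (hn0 : n ≠ 0) :
    0 < p ∧ 0 < q ∧ p ≠ q ∧ PySem.Int.mod p q = p % q ∧ PySem.Int.floordiv p q = p / q ∧
      0 ≤ p % q ∧ p % q < q := by
  have h : 0 < p ∧ 0 < q ∧ p ≠ q := by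
    rcases hg with h | h | h | h <;> first | exact absurd h ‹_› | exact h
  obtain ⟨hp, hq, hpq⟩ := h
  exact ⟨hp, hq, hpq, PySem.Int.mod_eq_emod_of_pos hq,
    PySem.Int.floordiv_eq_ediv_of_pos hq, Int.emod_nonneg p (by omega), Int.emod_lt_of_pos p hq⟩

theorem solveFuel_stab : ∀ (f : Nat) (p q n : Int), Good p q n → mu p q ≤ f →
    solveFuel f p q n = solveFuel (f+1) p q n := by
  intro f
  induction f using Nat.strong_induction_on with
  | _ f ih =>
    intro p q n hg hmu
    obtain ⟨k, rfl⟩ : ∃ k, f = k + 1 := ⟨f - 1, by unfold mu at hmu; omega⟩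
    rw [solveFuel_succ, solveFuel_succ]
    split_ifs with h1 h2 h3 h4
    · rfl
    · rfl
    · rfl
    · -- reduce: p % q recursion
      obtain ⟨hp, hq, hpq, hm, hd, hr0, hrq⟩ := step_facts p q n hg h1 h2 h3
      congr 1
      rw [hm]
      apply ih k (Nat.lt_succ_self k)
      · rcases eq_or_lt_of_le hr0 with h | h
        · exact Or.inl h.symm
        · exact Or.inr (Or.inr (Or.inr ⟨h, hq, by omega⟩))
      · unfold mu at hmu ⊢; omega
    · -- swap: (q, p, m) recursion
      obtain ⟨hp, hq, hpq, hm, hd, hr0, hrq⟩ := step_facts p q n hg h1 h2 h3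
      congr 1
      apply ih k (Nat.lt_succ_self k)
      · exact Or.inr (Or.inr (Or.inr ⟨hq, hp, by omega⟩))
      · unfold mu at hmu ⊢; omega

theorem solveFuel_ge : ∀ (d f : Nat) (p q n : Int), Good p q n → mu p q ≤ f →
    solveFuel f p q n = solveFuel (f + d) p q n := by
  intro d
  induction d with
  | zero => intro f p q n _ _; rfl
  | succ d ih =>
    intro f p q n hg hmu
    rw [ih f p q n hg hmu, ← Nat.add_assoc]
    exact solveFuel_stab (f + d) p q n hg (by omega)

theorem solveFuel_to_solve (f : Nat) (p q n : Int) (hg : Good p q n) (hmu : mu p q ≤ f)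
    (hf : f ≤ 8589934592) : solveFuel f p q n = solve p q n := by
  unfold solve
  rw [show (8589934592:Nat) = f + (8589934592 - f) from by omega]
  exact solveFuel_ge _ f p q n hg hmu

-- unfolding equation for the fully-fuelled A at good inputs
set_option maxRecDepth 8192 in
theorem solve_eqn (p q n : Int) (hg : Good p q n) (hmu : mu p q ≤ 8589934592) :
    solve p q n =
      if p = 0 then 0
      else if q = 1 then PySem.Int.floordiv (n * (n + 1)) 2 * p
      else if n = 0 then 0
      else if q < p then
        PySem.Int.floordiv (n * (n + 1)) 2 * PySem.Int.floordiv p q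
          + solve (PySem.Int.mod p q) q n
      else
        n * PySem.Int.floordiv (n * p) q + PySem.Int.floordiv n q
          - solve q p (PySem.Int.floordiv (n * p) q) := by
  conv_lhs => rw [solve, show (8589934592:Nat) = 8589934591 + 1 from by omega, solveFuel_succ]
  split_ifs with h1 h2 h3 h4
  · rfl
  · rfl
  · rfl
  · obtain ⟨hp, hq, hpq, hm, hd, hr0, hrq⟩ := step_facts p q n hg h1 h2 h3
    have hGin : Good (PySem.Int.mod p q) q n := by
      rw [hm]
      rcases eq_or_lt_of_le hr0 with h | h
      · exact Or.inl h.symm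
      · exact Or.inr (Or.inr (Or.inr ⟨h, hq, by omega⟩))
    rw [solveFuel_to_solve 8589934591 (PySem.Int.mod p q) q n hGin
      (by rw [hm]; unfold mu at hmu ⊢; omega) (by omega)]
  · obtain ⟨hp, hq, hpq, hm, hd, hr0, hrq⟩ := step_facts p q n hg h1 h2 h3
    rw [solveFuel_to_solve 8589934591 q p (PySem.Int.floordiv (n * p) q)
      (Or.inr (Or.inr (Or.inr ⟨hq, hp, by omega⟩)))
      (by unfold mu at hmu ⊢; omega) (by omega)]

theorem solveLoop_succ (f : Nat) (ans sign p q n : Int) :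
    solveLoop (f+1) (ans, sign, p, q, n) =
      if p ≠ 0 ∧ n ≠ 0 ∧ q ≠ 1 then
        let d := PySem.Int.floordiv p q
        let r := PySem.Int.mod p q
        let ans1 := ans + sign * PySem.Int.floordiv (n * (n + 1)) 2 * d
        if r = 0 then (ans1, sign, r, q, n)
        else
          let m := PySem.Int.floordiv (n * r) q
          solveLoop f (ans1 + sign * (n * m + PySem.Int.floordiv n q), -sign, q, r, m)
      else (ans, sign, p, q, n) := rfl

-- loop invariant: B's loop + post code returns ans + sign * (A's value)
theorem solveLoop_inv : ∀ (f : Nat) (ans sign p q n : Int), Good p q n → mu p q ≤ f →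
    mu p q ≤ 8589934592 →
    solvePost (solveLoop f (ans, sign, p, q, n)) = ans + sign * solve p q n := by
  intro f
  induction f using Nat.strong_induction_on with
  | _ f ih =>
    intro ans sign p q n hg hmu hF
    obtain ⟨k, rfl⟩ : ∃ k, f = k + 1 := ⟨f - 1, by unfold mu at hmu; omega⟩
    rw [solveLoop_succ]
    by_cases hc : p ≠ 0 ∧ n ≠ 0 ∧ q ≠ 1
    · obtain ⟨hp0, hn0, hq1⟩ := hc
      obtain ⟨hp, hq, hpq, hm, hd, hr0, hrq⟩ := step_facts p q n hg hp0 hq1 hn0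
      simp only [if_pos (⟨hp0, hn0, hq1⟩ : p ≠ 0 ∧ n ≠ 0 ∧ q ≠ 1)]
      rw [solve_eqn p q n hg hF]
      simp only [if_neg hp0, if_neg hq1, if_neg hn0]
      by_cases hqp : q < p
      · -- A reduces; B's divmod is a real reduction
        rw [if_pos hqp]
        by_cases hr : PySem.Int.mod p q = 0
        · rw [if_pos hr, hr]
          have h0 : solve 0 q n = 0 := by
            rw [solve_eqn 0 q n (Or.inl rfl) (by unfold mu at hF ⊢; omega)]; simp
          rw [h0, solvePost]
          rw [if_neg (by simp [hq1])]
          ring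
        · rw [if_neg hr]
          have hr' : 0 < p % q := by rw [hm] at hr; omega
          have hGin : Good q (PySem.Int.mod p q) (PySem.Int.floordiv (n * PySem.Int.mod p q) q) :=
            Or.inr (Or.inr (Or.inr ⟨hq, by omega, by rw [hm]; omega⟩))
          rw [ih k (Nat.lt_succ_self k) _ _ _ _ _ hGin
            (by rw [hm]; unfold mu at hmu ⊢; omega) (by rw [hm]; unfold mu at hF ⊢; omega)]
          rw [solve_eqn (PySem.Int.mod p q) q n
            (Or.inr (Or.inr (Or.inr ⟨by omega, hq, by omega⟩)))
            (by rw [hm]; unfold mu at hF ⊢; omega)]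
          rw [if_neg (by omega), if_neg hq1, if_neg hn0, if_neg (by rw [hm]; omega)]
          ring
      · -- A swaps; B's divmod is a no-op (p < q)
        rw [if_neg hqp]
        have hplt : p < q := by omega
        have hdz : PySem.Int.floordiv p q = 0 := by
          rw [hd]; exact Int.ediv_eq_zero_of_lt (by omega) hplt
        have hrp : PySem.Int.mod p q = p := by
          rw [hm]; exact Int.emod_eq_of_lt (by omega) hplt
        rw [if_neg (by rw [hrp]; exact hp0), hrp, hdz]
        have hGin : Good q p (PySem.Int.floordiv (n * p) q) :=
          Or.inr (Or.inr (Or.inr ⟨hq, hp, by omega⟩))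
        rw [ih k (Nat.lt_succ_self k) _ _ _ _ _ hGin
          (by unfold mu at hmu ⊢; omega) (by unfold mu at hF ⊢; omega)]
        ring
    · simp only [if_neg hc]
      push Not at hc
      rw [solve_eqn p q n hg hF, solvePost]
      by_cases hp0 : p = 0
      · rw [if_pos hp0, if_neg (by simp [hp0])]; ring
      · rw [if_neg hp0]
        by_cases hq1 : q = 1
        · rw [if_pos hq1, if_pos ⟨hq1, hp0⟩]; ring
        · have hn : n = 0 := by
            by_cases hn : n = 0
            · exact hn
            · exact absurd (hc hp0 hn) hq1
          rw [if_neg hq1, if_pos hn, if_neg (by simp [hq1])]; ring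

-- ===== VERDICT (by name: the statement is the Claim_ definition above) =====
theorem solve_spec : Claim_equal_solve := by
  intro p q n hdom hpre
  have hb : -2147483648 ≤ p ∧ p ≤ 2147483648 ∧ -2147483648 ≤ q ∧ q ≤ 2147483648 := by
    unfold Dom_solve pvDomInt at hdom
    simp only [Bool.and_eq_true, decide_eq_true_eq] at hdom
    exact ⟨hdom.1.1.1, hdom.1.1.2, hdom.1.2.1, hdom.1.2.2⟩
  have hF : mu p q ≤ 8589934592 := by unfold mu; omega
  unfold Spec_solve solve_alt
  rw [solveLoop_inv 8589934592 0 1 p q n hpre (by unfold mu; omega) hF]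
  ring
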